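-- pv_equiv track=rewrite | github.com/RisingSatalite/text-formatter | code/formatter.py | greet
-- ===== SOURCE A (Python) =====
-- def greet(name):
--     updated = ""
--     capitalize = True
--     spaced = False
--     for i in name:
--         if(i == ' ' and spaced == False):
--             spaced = True
--             capitalize = True
--             updated += i
--         elif(i == ' ' and spaced == True):
--             capitalize = True
--             pass
--         elif(i.isalpha() == False):
--             updated += i
--             spaced = False
--         elif(capitalize == True):
--             updated += i.upper()
--             capitalize = False
--             spaced = False
--         else:
--             updated += i.lower()
--             spaced = False
--
--     return updated
-- ===== SOURCE B (Python) =====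
-- def greet(name):
--     # pass 1: collapse runs of spaces (keep a char unless it is a space following a space)
--     collapsed = []
--     prev = None
--     for c in name:
--         if c != ' ' or prev != ' ':
--             collapsed.append(c)
--         prev = c
--     # pass 2: capitalize the first letter of each word
--     out = []
--     capitalize = True
--     for c in collapsed:
--         if c == ' ':
--             out.append(c)
--             capitalize = True
--         elif not c.isalpha():
--             out.append(c)
--         elif capitalize:
--             out.append(c.upper())
--             capitalize = False
--         else:
--             out.append(c.lower())
--     return ''.join(out)
-- ===== Notes on version B (the rewrite author's own statement) =====
-- stated objective: alternative
-- what changed: Replaces A's single loop with three interlocking state flags by a two-pass design: first collapse consecutive spaces (tracking only the previous char), then a second pass with a single capitalize flag that title-cases words.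
import Mathlib
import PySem

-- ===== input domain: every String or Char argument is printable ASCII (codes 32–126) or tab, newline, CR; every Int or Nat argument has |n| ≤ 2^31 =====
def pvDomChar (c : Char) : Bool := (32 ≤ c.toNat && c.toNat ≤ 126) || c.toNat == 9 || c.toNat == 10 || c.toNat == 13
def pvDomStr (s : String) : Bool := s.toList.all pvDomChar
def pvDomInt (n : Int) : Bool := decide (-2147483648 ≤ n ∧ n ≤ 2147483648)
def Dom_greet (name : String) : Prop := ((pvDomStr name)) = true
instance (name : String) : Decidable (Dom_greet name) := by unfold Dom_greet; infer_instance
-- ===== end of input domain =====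

-- B replaces A's one loop with three flags by a two-pass design (collapse spaces, then title-case); equivalence of the return values is proved.

-- ===== PORT A =====
-- A's loop: state (updated, capitalize, spaced), branches in A's order.
def greetLoopA : List Char → List Char → Bool → Bool → List Char
  | [], u, _, _ => u
  | i :: t, u, cap, spaced =>
    if i == ' ' && spaced == false then
      greetLoopA t (u ++ [i]) true true
    else if i == ' ' && spaced == true then
      greetLoopA t u true spaced
    else if PySem.Chars.isalpha i == false then
      greetLoopA t (u ++ [i]) cap false
    else if cap == true then
      greetLoopA t (u ++ [PySem.Chars.upperChar i]) false false
    else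
      greetLoopA t (u ++ [PySem.Chars.lowerChar i]) cap false

def greet (name : String) : String :=
  String.mk (greetLoopA name.toList [] true false)

-- ===== PORT B =====
-- pass 1: keep a char unless it is a space following a space; state (collapsed, prev)
def greetCollapseB : List Char → List Char → Option Char → List Char
  | [], acc, _ => acc
  | c :: t, acc, prev =>
    greetCollapseB t (if c != ' ' || prev != some ' ' then acc ++ [c] else acc) (some c)

-- pass 2: title-case with a single capitalize flag; state (out, capitalize)
def greetTitleB : List Char → List Char → Bool → List Char
  | [], out, _ => out
  | c :: t, out, cap =>
    if c == ' ' then greetTitleB t (out ++ [c]) true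
    else if !(PySem.Chars.isalpha c) then greetTitleB t (out ++ [c]) cap
    else if cap then greetTitleB t (out ++ [PySem.Chars.upperChar c]) false
    else greetTitleB t (out ++ [PySem.Chars.lowerChar c]) cap

def greet_alt (name : String) : String :=
  String.mk (greetTitleB (greetCollapseB name.toList [] none) [] true)

-- ===== PRECONDITION & SPEC =====
def Spec_greet (name : String) (out : String) : Prop := out = greet_alt name
instance (name : String) (out : String) : Decidable (Spec_greet name out) := by unfold Spec_greet; infer_instance

-- ===== CLAIM (what is proved, stated in full; the proofs are below) =====
def Claim_equal_greet : Prop := ∀ (name : String), Dom_greet name → Spec_greet name (greet name)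

-- ===== LEMMAS AND PROOFS =====

-- reference collapse: spaced = "previous char was a space"
def collapseR : Bool → List Char → List Char
  | _, [] => []
  | spaced, c :: t =>
    if c = ' ' then (if spaced then collapseR true t else c :: collapseR true t)
    else c :: collapseR false t

theorem greetCollapseB_eq (l : List Char) :
    ∀ (acc : List Char) (prev : Option Char),
      greetCollapseB l acc prev = acc ++ collapseR (decide (prev = some ' ')) l := by
  induction l with
  | nil => intro acc prev; simp [greetCollapseB, collapseR]
  | cons c t ih =>
    intro acc prev
    simp only [greetCollapseB, ih]
    by_cases hc : c = ' ' <;> by_cases hp : prev = some ' ' <;>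
      simp [hc, hp, collapseR]

theorem greetLoopA_eq (l : List Char) :
    ∀ (u : List Char) (cap spaced : Bool), (spaced = true → cap = true) →
      greetLoopA l u cap spaced = greetTitleB (collapseR spaced l) u cap := by
  induction l with
  | nil => intro u cap spaced _; simp [greetLoopA, collapseR, greetTitleB]
  | cons c t ih =>
    intro u cap spaced hinv
    by_cases hc : c = ' '
    · cases spaced with
      | false => simp [greetLoopA, collapseR, greetTitleB, hc, ih]
      | true =>
        have hcap : cap = true := hinv rfl
        subst hcap
        simp [greetLoopA, collapseR, hc, ih]
    · by_cases ha : PySem.Chars.isalpha c = true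
      · cases cap with
        | false => simp [greetLoopA, collapseR, greetTitleB, hc, ha, ih]
        | true => simp [greetLoopA, collapseR, greetTitleB, hc, ha, ih]
      · simp [greetLoopA, collapseR, greetTitleB, hc, ha, ih]

-- ===== VERDICT (by name: the statement is the Claim_ definition above) =====
theorem greet_spec : Claim_equal_greet := by
  intro name _
  unfold Spec_greet greet greet_alt
  rw [greetLoopA_eq _ _ _ _ (by simp), greetCollapseB_eq]
  simp
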